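-- pv_equiv track=rewrite | github.com/mrgkumar/sanskrit-keyboard | scripts/runProbabilisticPredictionGame.py | normalize_for_lexical_lookup
-- ===== SOURCE A (Python) =====
-- def normalize_for_lexical_lookup(value: str) -> str:
--   result_chars: list[str] = []
--   index = 0
--   while index < len(value):
--     char = value[index]
--     if char == '\\' and index + 1 < len(value):
--       escaped = value[index + 1]
--       if escaped in "_'\"^":
--         index += 2
--         continue
--
--     if char in "_'\"^":
--       index += 1
--       continue
--
--     result_chars.append(char)
--     index += 1
--
--   return ''.join(result_chars)
-- ===== SOURCE B (Python) =====
-- MARKERS = "_'\"^"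
-- _DELETE = str.maketrans('', '', MARKERS)
--
-- def normalize_for_lexical_lookup(value: str) -> str:
--   # Staged split/join: cut the string at every backslash, classify each
--   # later segment (escaped marker vs ordinary backslash), delete markers
--   # per segment with str.translate, and join.
--   parts = value.split('\\')
--   pieces = [parts[0].translate(_DELETE)]
--   for p in parts[1:]:
--     if p and p[0] in MARKERS:
--       pieces.append(p[1:].translate(_DELETE))   # backslash escaped a marker: both gone
--     else:
--       pieces.append('\\' + p.translate(_DELETE))  # backslash was ordinary: keep it
--   return ''.join(pieces)
-- ===== Notes on version B (the rewrite author's own statement) =====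
-- stated objective: alternative
-- what changed: A's single index-lookahead scan is replaced by a staged split/join pipeline: split the string at every backslash, classify each later segment by whether its first character is a marker (escaped marker vs ordinary backslash), delete markers per segment with str.translate, and join the pieces; the per-character Python loop disappears into C-level str.split/str.translate.
import Mathlib
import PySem

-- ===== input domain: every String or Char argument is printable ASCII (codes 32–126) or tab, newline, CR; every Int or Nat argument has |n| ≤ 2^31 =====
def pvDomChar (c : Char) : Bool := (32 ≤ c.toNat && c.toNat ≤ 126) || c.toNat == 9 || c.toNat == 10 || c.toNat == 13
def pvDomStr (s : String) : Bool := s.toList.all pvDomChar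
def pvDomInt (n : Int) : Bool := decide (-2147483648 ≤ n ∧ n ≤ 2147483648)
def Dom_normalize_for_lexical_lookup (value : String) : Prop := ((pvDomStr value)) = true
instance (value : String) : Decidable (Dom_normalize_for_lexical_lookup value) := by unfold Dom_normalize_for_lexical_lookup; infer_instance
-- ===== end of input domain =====

-- B replaces A's index-lookahead scan by a split-at-backslash / classify-segment /
-- delete-markers / join pipeline (objective: alternative; same O(n) cost).

def pvIsMarker (c : Char) : Bool := c = '_' || c = '\'' || c = '"' || c = '^'

-- ===== PORT A =====
-- while index < len(value): lookahead at value[index+1] on a backslash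
def pvAGo (cs : List Char) (index : Nat) (acc : List Char) : List Char :=
  if h : index < cs.length then
    let c := cs[index]
    if c = '\\' ∧ index + 1 < cs.length then
      let escaped := cs.getD (index + 1) ' '
      if pvIsMarker escaped then
        pvAGo cs (index + 2) acc
      else if pvIsMarker c then
        pvAGo cs (index + 1) acc
      else
        pvAGo cs (index + 1) (acc ++ [c])
    else if pvIsMarker c then
      pvAGo cs (index + 1) acc
    else
      pvAGo cs (index + 1) (acc ++ [c])
  else acc
termination_by cs.length - index

def normalize_for_lexical_lookup (value : String) : String :=
  String.ofList (pvAGo value.toList 0 [])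

-- ===== PORT B =====
-- value.split('\\'): cut at every backslash (Python split-on-separator semantics)
def pvSplit : List Char → List (List Char)
  | [] => [[]]
  | c :: rest =>
    if c = '\\' then [] :: pvSplit rest
    else
      match pvSplit rest with
      | p :: ps => (c :: p) :: ps
      | [] => [[c]]

-- p.translate(_DELETE): delete every marker character from a segment
def pvDel (p : List Char) : List Char := p.filter (fun c => !pvIsMarker c)

-- one later segment: its preceding backslash escaped a marker, or was ordinary
def pvSeg (p : List Char) : List Char :=
  match p with
  | e :: t => if pvIsMarker e then pvDel t else '\\' :: pvDel (e :: t)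
  | [] => ['\\']

def normalize_for_lexical_lookup_alt (value : String) : String :=
  match pvSplit value.toList with
  | p :: rest => String.ofList (pvDel p ++ rest.flatMap pvSeg)
  | [] => ""   -- unreachable: split never returns an empty list

-- ===== PRECONDITION & SPEC =====
def Spec_normalize_for_lexical_lookup (value : String) (out : String) : Prop := out = normalize_for_lexical_lookup_alt value
instance (value : String) (out : String) : Decidable (Spec_normalize_for_lexical_lookup value out) := by unfold Spec_normalize_for_lexical_lookup; infer_instance

-- ===== CLAIM (what is proved, stated in full; the proofs are below) =====
def Claim_equal_normalize_for_lexical_lookup : Prop := ∀ (value : String), Dom_normalize_for_lexical_lookup value → Spec_normalize_for_lexical_lookup value (normalize_for_lexical_lookup value)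

-- ===== LEMMAS AND PROOFS =====

-- reference recursion on the remaining suffix (characterises A's loop)
def pvG : List Char → List Char
  | [] => []
  | c :: rest =>
    if c = '\\' then
      match rest with
      | e :: rest' => if pvIsMarker e then pvG rest' else '\\' :: pvG (e :: rest')
      | [] => ['\\']
    else if pvIsMarker c then pvG rest else c :: pvG rest
termination_by cs => cs.length
decreasing_by all_goals (simp; try omega)

theorem pvAGo_eq_g (cs : List Char) (index : Nat) (acc : List Char) :
    pvAGo cs index acc = acc ++ pvG (cs.drop index) := by
  induction hn : cs.length - index using Nat.strong_induction_on generalizing index acc with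
  | _ n ih =>
  by_cases h : index < cs.length
  · have hdrop : cs.drop index = cs[index] :: cs.drop (index + 1) :=
      (List.getElem_cons_drop h).symm
    rw [pvAGo]
    simp only [h, dif_pos]
    by_cases hb : cs[index] = '\\' ∧ index + 1 < cs.length
    · obtain ⟨hc, hl⟩ := hb
      have hdrop2 : cs.drop (index + 1) = cs[index + 1] :: cs.drop (index + 2) :=
        (List.getElem_cons_drop hl).symm
      have hget : cs.getD (index + 1) ' ' = cs[index + 1] := by
        rw [List.getD_eq_getElem _ _ hl]
      simp only [hc, hl, and_self, if_pos, hget]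
      rw [hdrop, hdrop2, hc, pvG.eq_def]
      by_cases hm : pvIsMarker cs[index + 1]
      · simp only [hm, if_pos]
        exact ih (cs.length - (index + 2)) (by omega) _ _ rfl
      · have hmc : pvIsMarker '\\' = false := by decide
        simp only [hm, hmc, ite_false, ite_true, Bool.false_eq_true]
        rw [ih (cs.length - (index + 1)) (by omega) (index + 1) (acc ++ ['\\']) rfl, hdrop2]
        simp
    · simp only [hb, if_neg, not_false_iff]
      rw [hdrop, pvG.eq_def]
      by_cases hc : cs[index] = '\\'
      · have hl : ¬ index + 1 < cs.length := fun hl => hb ⟨hc, hl⟩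
        have hnil : cs.drop (index + 1) = [] := List.drop_eq_nil_of_le (by omega)
        have hm : pvIsMarker cs[index] = false := by rw [hc]; decide
        simp only [hm, Bool.false_eq_true, if_false]
        rw [ih (cs.length - (index + 1)) (by omega) (index + 1) (acc ++ [cs[index]]) rfl, hnil]
        simp [hc, pvG]
      · by_cases hm : pvIsMarker cs[index]
        · simp only [hc, ite_false, hm, ite_true]
          exact ih (cs.length - (index + 1)) (by omega) _ _ rfl
        · simp only [hc, hm, ite_false, Bool.false_eq_true]
          rw [ih (cs.length - (index + 1)) (by omega) (index + 1) (acc ++ [cs[index]]) rfl]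
          simp
  · rw [pvAGo]
    simp only [h, dif_neg, not_false_iff]
    rw [List.drop_eq_nil_of_le (by omega)]
    simp [pvG]

theorem pvSplit_ne_nil (cs : List Char) : pvSplit cs ≠ [] := by
  cases cs with
  | nil => simp [pvSplit]
  | cons c rest =>
    unfold pvSplit
    by_cases hc : c = '\\' <;> simp [hc] <;> (cases h : pvSplit rest <;> simp)

-- the heart of the proof: A's suffix recursion equals B's segment rendering,
-- together with the shifted form for a suffix starting after a backslash
theorem pvG_eq_split (cs : List Char) :
    (∀ p ps, pvSplit cs = p :: ps → pvG cs = pvDel p ++ ps.flatMap pvSeg)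
    ∧ pvG ('\\' :: cs) = (pvSplit cs).flatMap pvSeg := by
  induction hn : cs.length using Nat.strong_induction_on generalizing cs with
  | _ n ih =>
  subst hn
  have hmb : pvIsMarker '\\' = false := by decide
  constructor
  · intro p ps hsp
    cases cs with
    | nil =>
      simp [pvSplit] at hsp
      obtain ⟨h1, h2⟩ := hsp
      subst h1; subst h2
      simp [pvG, pvDel]
    | cons c rest =>
      by_cases hc : c = '\\'
      · subst hc
        simp [pvSplit] at hsp
        obtain ⟨h1, h2⟩ := hsp
        subst h1; subst h2
        simpa [pvDel] using (ih rest.length (by simp) rest rfl).2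
      · obtain ⟨q, qs, hq⟩ : ∃ q qs, pvSplit rest = q :: qs := by
          cases h : pvSplit rest with
          | nil => exact absurd h (pvSplit_ne_nil rest)
          | cons q qs => exact ⟨q, qs, rfl⟩
        have hsp' : pvSplit (c :: rest) = (c :: q) :: qs := by
          simp [pvSplit, hc, hq]
        rw [hsp'] at hsp
        obtain ⟨h1, h2⟩ := List.cons.inj hsp
        subst h1; subst h2
        have hrest := (ih rest.length (by simp) rest rfl).1 q qs hq
        by_cases hm : pvIsMarker c
        · rw [pvG.eq_def]
          simp only [hc, hm, Bool.false_eq_true, if_false]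
          rw [hrest]
          simp [pvDel, hm]
        · rw [pvG.eq_def]
          simp only [hc, hm, Bool.false_eq_true, if_false]
          rw [hrest]
          simp [pvDel, hm]
  · cases cs with
    | nil => simp [pvSplit, pvG, pvSeg]
    | cons e rest =>
      by_cases he : e = '\\'
      · subst he
        have h2 := (ih rest.length (by simp) rest rfl).2
        rw [pvG.eq_def]
        simp only [ite_true, hmb, Bool.false_eq_true, if_false]
        rw [h2]
        simp [pvSplit, pvSeg]
      · obtain ⟨q, qs, hq⟩ : ∃ q qs, pvSplit rest = q :: qs := by
          cases h : pvSplit rest with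
          | nil => exact absurd h (pvSplit_ne_nil rest)
          | cons q qs => exact ⟨q, qs, rfl⟩
        have hrest := (ih rest.length (by simp) rest rfl).1 q qs hq
        have hsp : pvSplit (e :: rest) = (e :: q) :: qs := by
          simp [pvSplit, he, hq]
        rw [hsp]
        by_cases hm : pvIsMarker e
        · rw [pvG.eq_def]
          simp only [hm, if_pos]
          rw [hrest]
          simp [pvSeg, hm]
        · rw [pvG.eq_def]
          simp only [ite_true, hm, Bool.false_eq_true, if_false]
          rw [show pvG (e :: rest) = e :: pvG rest by
            rw [pvG.eq_def]; simp [he, hm]]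
          rw [hrest]
          simp [pvSeg, hm, pvDel]

-- ===== VERDICT (by name: the statement is the Claim_ definition above) =====
theorem normalize_for_lexical_lookup_spec : Claim_equal_normalize_for_lexical_lookup := by
  intro value _
  show normalize_for_lexical_lookup value = normalize_for_lexical_lookup_alt value
  unfold normalize_for_lexical_lookup normalize_for_lexical_lookup_alt
  rw [pvAGo_eq_g]
  obtain ⟨p, ps, hq⟩ : ∃ p ps, pvSplit value.toList = p :: ps := by
    cases h : pvSplit value.toList with
    | nil => exact absurd h (pvSplit_ne_nil value.toList)
    | cons p ps => exact ⟨p, ps, rfl⟩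
  rw [hq]
  simp only [List.drop_zero, List.nil_append]
  exact congrArg _ ((pvG_eq_split value.toList).1 p ps hq)
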